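-- pv_equiv track=rewrite | github.com/CS70/effortanalysis | answers_count.py | extract_answers_from_text
-- ===== SOURCE A (Python) =====
-- ALLOWED_CHARS = {' ', '\n', '+', '-', '=', '(', ')', ',', ':'}
--
-- def extract_answers_from_text(text):
--     """Extract answers from the provided text"""
--     answers = []
--     for answer in text.split('\\answer{'):
--         depth, chars, removeit = 1, [], False
--         for c in answer:
--
--             # check depth
--             if c == '{': depth += 1
--             elif c == '}': depth -= 1
--             if depth == 0: break
--
--             # skip anything of the form \text
--             if c == '\\': removeit = True
--             if removeit and c in (' ', '\n'): removeit = False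
--
--             # add character only if allowed
--             if (c.isalpha() or c.isnumeric() or c in ALLOWED_CHARS) and not removeit:
--                 chars.append(c)
--
--         answers.append(''.join(chars).strip())
--     return answers[1:]
-- ===== SOURCE B (Python) =====
-- ALLOWED_CHARS = {' ', '\n', '+', '-', '=', '(', ')', ',', ':'}
--
-- def extract_answers_from_text(text):
--     """Extract answers from the provided text"""
--     results = []
--     for seg in text.split('\\answer{')[1:]:
--         # pass 1: cut at the matching closing brace (depth scan)
--         prefix = []
--         depth = 1
--         for c in seg:
--             if c == '{':
--                 depth += 1
--             elif c == '}':
--                 depth -= 1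
--             if depth == 0:
--                 break
--             prefix.append(c)
--         # pass 2: delete backslash command runs (the terminating space/newline is kept)
--         kept = []
--         skipping = False
--         for c in prefix:
--             if skipping:
--                 if c in ' \n':
--                     skipping = False
--                     kept.append(c)
--             elif c == '\\':
--                 skipping = True
--             else:
--                 kept.append(c)
--         # pass 3: keep only letters, digits and allowed punctuation
--         cleaned = ''.join(c for c in kept if c.isalpha() or c.isdigit() or c in ALLOWED_CHARS)
--         results.append(cleaned.strip())
--     return results
-- ===== Notes on version B (the rewrite author's own statement) =====
-- stated objective: simpler
-- what changed: A's single fused per-segment loop (depth tracking, removeit flag and character filtering interleaved in one body) is split into three separate passes (depth scan cutting at the matching brace, deletion of backslash command runs, filter of allowed characters), and B only processes the segments after the first '\answer{' instead of processing the discarded leading segment too.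
import Mathlib
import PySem

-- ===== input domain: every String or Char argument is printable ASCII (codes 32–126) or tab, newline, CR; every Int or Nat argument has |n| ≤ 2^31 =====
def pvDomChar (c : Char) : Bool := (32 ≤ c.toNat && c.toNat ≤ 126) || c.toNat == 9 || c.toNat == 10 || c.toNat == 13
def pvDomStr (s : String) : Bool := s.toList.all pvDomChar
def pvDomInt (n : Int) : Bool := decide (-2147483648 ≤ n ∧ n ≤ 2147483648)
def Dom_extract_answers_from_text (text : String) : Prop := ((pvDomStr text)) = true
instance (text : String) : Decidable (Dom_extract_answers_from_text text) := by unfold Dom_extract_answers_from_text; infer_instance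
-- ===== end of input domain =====

-- B replaces A's single fused per-segment loop (depth tracking + removeit flag + character
-- filter in one body) by three separate passes: a depth scan cutting the segment at the
-- matching brace, a pass deleting backslash command runs, and a filter keeping allowed
-- characters (objective: simpler decomposition, same cost).
-- isalpha/isnumeric/isdigit are ported as PySem.Chars.isalpha/isdigit, exact on the ASCII domain Dom.

-- ===== PORT A =====
-- membership test in the module constant ALLOWED_CHARS (shared by both ports)
def pvAllowed (c : Char) : Bool :=
  c == ' ' || c == '\n' || c == '+' || c == '-' || c == '=' ||
  c == '(' || c == ')' || c == ',' || c == ':'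

-- the depth update both Pythons perform on each character (shared by both ports)
def pvStep (depth : Int) (c : Char) : Int :=
  if c == '{' then depth + 1 else if c == '}' then depth - 1 else depth

-- A's inner for-loop over one segment: depth / removeit / chars fused, break at depth 0
def pvLoopA : Int → Bool → List Char → List Char
  | _, _, [] => []
  | depth, removeit, c :: cs =>
    if pvStep depth c = 0 then []
    else
      let r1 := if c == '\\' then true else removeit
      let r2 := if r1 && (c == ' ' || c == '\n') then false else r1
      (if (PySem.Chars.isalpha c || PySem.Chars.isdigit c || pvAllowed c) && !r2 then [c] else [])
        ++ pvLoopA (pvStep depth c) r2 cs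

def extract_answers_from_text (text : String) : List String :=
  ((PySem.Chars.splitOn text.toList "\\answer{".toList).map
    (fun seg => PySem.Str.strip (String.ofList (pvLoopA 1 false seg)))).drop 1

-- ===== PORT B =====
-- pass 1: cut the segment at the matching closing brace (depth scan)
def pvCutB : Int → List Char → List Char
  | _, [] => []
  | depth, c :: cs =>
    if pvStep depth c = 0 then [] else c :: pvCutB (pvStep depth c) cs

-- pass 2: delete backslash command runs (the terminating space/newline is kept)
def pvRemB : Bool → List Char → List Char
  | _, [] => []
  | skipping, c :: cs =>
    if skipping then
      if c == ' ' || c == '\n' then c :: pvRemB false cs else pvRemB true cs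
    else if c == '\\' then pvRemB true cs
    else c :: pvRemB false cs

def extract_answers_from_text_alt (text : String) : List String :=
  ((PySem.Chars.splitOn text.toList "\\answer{".toList).drop 1).map (fun seg =>
    PySem.Str.strip (String.ofList
      ((pvRemB false (pvCutB 1 seg)).filter
        (fun c => PySem.Chars.isalpha c || PySem.Chars.isdigit c || pvAllowed c))))

-- ===== PRECONDITION & SPEC =====
def Spec_extract_answers_from_text (text : String) (out : List String) : Prop := out = extract_answers_from_text_alt text
instance (text : String) (out : List String) : Decidable (Spec_extract_answers_from_text text out) := by unfold Spec_extract_answers_from_text; infer_instance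

-- ===== CLAIM (what is proved, stated in full; the proofs are below) =====
def Claim_equal_extract_answers_from_text : Prop := ∀ (text : String), Dom_extract_answers_from_text text → Spec_extract_answers_from_text text (extract_answers_from_text text)

-- ===== LEMMAS AND PROOFS =====

-- A's fused loop equals B's three passes on every segment
theorem pvLoopA_eq (cs : List Char) : ∀ (d : Int) (r : Bool),
    pvLoopA d r cs =
      (pvRemB r (pvCutB d cs)).filter
        (fun c => PySem.Chars.isalpha c || PySem.Chars.isdigit c || pvAllowed c) := by
  induction cs with
  | nil => intro d r; simp [pvLoopA, pvCutB, pvRemB]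
  | cons c cs ih =>
    intro d r
    simp only [pvLoopA, pvCutB]
    by_cases hd : pvStep d c = 0
    · simp [hd, pvRemB]
    · simp only [if_neg hd, pvRemB]
      cases r with
      | true =>
        by_cases hs : (c == ' ' || c == '\n') = true
        · have hc := hs
          rw [Bool.or_eq_true] at hc
          rcases hc with h' | h' <;> rcases eq_of_beq h' with rfl <;>
            simp [ih, pvAllowed]
        · simp [hs, ih]
      | false =>
        by_cases hb : (c == '\\') = true
        · rcases eq_of_beq hb with rfl
          simp [ih]
        · by_cases hall : (PySem.Chars.isalpha c || PySem.Chars.isdigit c || pvAllowed c) = true <;>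
            simp [hb, hall, ih]

-- ===== VERDICT (by name: the statement is the Claim_ definition above) =====
theorem extract_answers_from_text_spec : Claim_equal_extract_answers_from_text := by
  intro text _
  unfold Spec_extract_answers_from_text extract_answers_from_text extract_answers_from_text_alt
  rw [List.map_drop]
  exact congrArg (List.drop 1) (List.map_congr_left (fun seg _ => by rw [pvLoopA_eq]))
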